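-- pv_equiv track=rewrite | github.com/pratham1singh/GFG-geeks-for-geeks-solutions | Total Cuts - GFG/total-cuts.py | totalCuts
-- ===== SOURCE A (Python) =====
-- from typing import List
--
-- def totalCuts(N : int, k: int, arr : List[int]) -> int:
--     if N==1:
--         return 0
--     i=0
--     lg=arr[0]
--     sm=min(arr[1:])
--     ans=0
--     while i<N-1:
--         if(lg+sm>=k):
--             ans+=1
--         i+=1
--         if lg<arr[i]:
--             lg=arr[i]
--         if arr[i]==sm and i+1<=N-1:
--             sm=min(arr[i+1:])
--     return ans
-- ===== SOURCE B (Python) =====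
-- from typing import List
--
-- def totalCuts(N: int, k: int, arr: List[int]) -> int:
--     # suffix minima in one backward pass, then a single forward pass with a running max
--     suf = [0] * len(arr)
--     for j in range(len(arr) - 1, -1, -1):
--         x = arr[j]
--         suf[j] = x if j == len(arr) - 1 or x < suf[j + 1] else suf[j + 1]
--     ans = 0
--     pm = None
--     for i in range(N - 1):
--         x = arr[i]
--         pm = x if pm is None or x > pm else pm
--         if pm + suf[i + 1] >= k:
--             ans += 1
--     return ans
-- ===== Notes on version B (the rewrite author's own statement) =====
-- stated objective: faster
-- what changed: A rescans the suffix with min(arr[i+1:]) inside its loop whenever the current element equals the running minimum (quadratic on duplicate-heavy inputs); B precomputes a suffix-minima array in one backward pass and then counts with a running prefix max in one forward pass.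
import Mathlib
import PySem

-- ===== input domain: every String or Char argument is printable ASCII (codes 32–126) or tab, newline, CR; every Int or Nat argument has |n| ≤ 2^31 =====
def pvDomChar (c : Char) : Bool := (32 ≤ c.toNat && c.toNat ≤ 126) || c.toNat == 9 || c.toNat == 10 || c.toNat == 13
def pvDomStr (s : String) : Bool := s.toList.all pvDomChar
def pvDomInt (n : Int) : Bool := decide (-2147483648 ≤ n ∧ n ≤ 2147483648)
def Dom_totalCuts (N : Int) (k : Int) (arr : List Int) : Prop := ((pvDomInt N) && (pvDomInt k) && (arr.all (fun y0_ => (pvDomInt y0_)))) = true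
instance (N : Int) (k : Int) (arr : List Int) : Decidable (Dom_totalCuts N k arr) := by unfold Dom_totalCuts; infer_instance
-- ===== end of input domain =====

-- B replaces A's repeated min(arr[i+1:]) rescans by a precomputed suffix-minima list plus a
-- single forward pass with a running prefix max (measurably faster on duplicate-heavy inputs).

-- ===== PORT A =====
-- while i < N-1: check lg+sm>=k; i+=1; lg = arr[i] if lg < arr[i]; sm = min(arr[i+1:]) when
-- arr[i]==sm and i+1<=N-1.  Python's locals i'=i+1 and arr[i'] are inlined at each use.
def totalCutsLoopA (k N : Int) (arr : List Int) : Nat → Int → Int → Int → Int → Int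
  | 0, _, _, _, ans => ans
  | fuel + 1, i, lg, sm, ans =>
    if i < N - 1 then
      totalCutsLoopA k N arr fuel (i + 1)
        (if lg < (PySem.List.pyGet? arr (i + 1)).getD 0 then (PySem.List.pyGet? arr (i + 1)).getD 0 else lg)
        (if (PySem.List.pyGet? arr (i + 1)).getD 0 = sm ∧ (i + 1) + 1 ≤ N - 1
         then (PySem.List.min? (PySem.List.slice arr (some ((i + 1) + 1)) none) (fun y => y)).getD sm
         else sm)
        (if lg + sm ≥ k then ans + 1 else ans)
    else ans

def totalCuts (N : Int) (k : Int) (arr : List Int) : Int :=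
  if N = 1 then 0
  else
    totalCutsLoopA k N arr (N - 1).toNat 0
      ((PySem.List.pyGet? arr 0).getD 0)
      ((PySem.List.min? (PySem.List.slice arr (some 1) none) (fun y => y)).getD 0)
      0

-- ===== PORT B =====
-- suf[j] = arr[j] if j == len-1 or arr[j] < suf[j+1] else suf[j+1], built back-to-front
def sufMinsB (arr : List Int) : List Int :=
  match arr with
  | [] => []
  | x :: rest =>
    match sufMinsB rest with
    | [] => [x]
    | m :: t => (if x < m then x else m) :: m :: t

-- the forward pass; Python's local pm is inlined at each of its two uses
def totalCuts_alt (N : Int) (k : Int) (arr : List Int) : Int :=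
  ((PySem.List.pyRange 0 (N - 1) 1).foldl
    (fun (st : Option Int × Int) (i : Int) =>
      (some (match st.1 with
             | none => (PySem.List.pyGet? arr i).getD 0
             | some p => if (PySem.List.pyGet? arr i).getD 0 > p then (PySem.List.pyGet? arr i).getD 0 else p),
       if (match st.1 with
           | none => (PySem.List.pyGet? arr i).getD 0
           | some p => if (PySem.List.pyGet? arr i).getD 0 > p then (PySem.List.pyGet? arr i).getD 0 else p)
          + (PySem.List.pyGet? (sufMinsB arr) (i + 1)).getD 0 ≥ k then st.2 + 1 else st.2))
    (none, 0)).2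

-- ===== PRECONDITION & SPEC =====
-- Pre_ is exactly where the Python A returns: N == 1, or arr has at least two elements and N <= len(arr)
-- (otherwise A raises IndexError on arr[0]/arr[i] or ValueError on min() of an empty slice).
def Pre_totalCuts (N : Int) (k : Int) (arr : List Int) : Prop :=
  N = 1 ∨ (2 ≤ arr.length ∧ N ≤ (arr.length : Int))
instance (N : Int) (k : Int) (arr : List Int) : Decidable (Pre_totalCuts N k arr) := by
  unfold Pre_totalCuts; infer_instance

def pvWitness_totalCuts : Int × Int × List Int := (4, 5, [3, 1, 4, 2])

def Spec_totalCuts (N : Int) (k : Int) (arr : List Int) (out : Int) : Prop := out = totalCuts_alt N k arr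
instance (N : Int) (k : Int) (arr : List Int) (out : Int) : Decidable (Spec_totalCuts N k arr out) := by unfold Spec_totalCuts; infer_instance

-- ===== CLAIM (what is proved, stated in full; the proofs are below) =====
def Claim_equal_totalCuts : Prop := ∀ (N : Int) (k : Int) (arr : List Int), Dom_totalCuts N k arr → Pre_totalCuts N k arr → Spec_totalCuts N k arr (totalCuts N k arr)

-- ===== LEMMAS AND PROOFS =====

-- minimum of a nonempty list (0 for []); the common value both programs track
def sMin : List Int → Int
  | [] => 0
  | x :: l => if l = [] then x else min x (sMin l)

-- common reference loop: at index j test the prefix max lg against the suffix min, then fold in arr[j+1]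
def specCnt (k : Int) (arr : List Int) : Nat → Nat → Int → Int → Int
  | 0, _, _, ans => ans
  | fuel + 1, j, lg, ans =>
      specCnt k arr fuel (j + 1) (max lg (arr.getD (j + 1) 0))
        (if lg + sMin (arr.drop (j + 1)) ≥ k then ans + 1 else ans)

theorem sMin_cons {x : Int} {l : List Int} (h : l ≠ []) : sMin (x :: l) = min x (sMin l) := by
  simp [sMin, h]

theorem foldl_min_eq_sMin (t : List Int) : ∀ x : Int, t.foldl min x = sMin (x :: t) := by
  induction t with
  | nil => intro x; simp [sMin]
  | cons y t' ih =>
    intro x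
    rcases eq_or_ne t' [] with rfl | ht
    · simp [sMin]
    · rw [List.foldl_cons, ih (min x y), sMin_cons ht,
        sMin_cons (by simp : (y :: t') ≠ []), sMin_cons ht, min_assoc]

theorem min?_eq_sMin {l : List Int} (h : l ≠ []) :
    PySem.List.min? l (fun y => y) = some (sMin l) := by
  cases l with
  | nil => simp at h
  | cons x t => rw [PySem.List.min?_id_cons, foldl_min_eq_sMin]

theorem if_lt_eq_max (a b : Int) : (if a < b then b else a) = max a b := by
  by_cases h : a < b <;> simp [max_def] <;> omega

theorem if_gt_eq_max (a b : Int) : (if b > a then b else a) = max a b := if_lt_eq_max a b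

theorem if_lt_eq_min (a b : Int) : (if a < b then a else b) = min a b := by
  by_cases h : a < b <;> simp [min_def] <;> omega

theorem drop_ne_nil_of_lt {arr : List Int} {j : Nat} (h : j < arr.length) :
    arr.drop j ≠ [] := by
  simp [List.drop_eq_nil_iff]; omega

-- A's sm update keeps sm = min(arr[j+2:]) whatever branch is taken
theorem sm_step {arr : List Int} {j : Nat} (h1 : j + 1 < arr.length) (h2 : j + 2 < arr.length)
    {ai : Int} (hai : ai = arr[j + 1]'h1) :
    (if ai = sMin (arr.drop (j + 1)) then sMin (arr.drop (j + 2)) else sMin (arr.drop (j + 1)))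
      = sMin (arr.drop (j + 2)) := by
  have hcons : arr[j + 1]'h1 :: arr.drop (j + 2) = arr.drop (j + 1) := List.getElem_cons_drop h1
  have hne : arr.drop (j + 2) ≠ [] := drop_ne_nil_of_lt h2
  have hmin : sMin (arr.drop (j + 1)) = min ai (sMin (arr.drop (j + 2))) := by
    rw [← hcons, sMin_cons hne, hai]
  split_ifs with hb
  · rfl
  · rw [hmin] at hb ⊢
    rcases le_total ai (sMin (arr.drop (j + 2))) with h | h
    · exact absurd (min_eq_left h).symm hb
    · exact min_eq_right h

theorem loopA_eq_spec (k N : Int) (arr : List Int) (hN : N ≤ (arr.length : Int)) :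
    ∀ (fuel j : Nat) (lg ans : Int), (j : Int) + fuel = N - 1 →
      totalCutsLoopA k N arr fuel (j : Int) lg (sMin (arr.drop (j + 1))) ans
        = specCnt k arr fuel j lg ans := by
  intro fuel
  induction fuel with
  | zero => intro j lg ans _; rfl
  | succ f ih =>
    intro j lg ans hj
    have hjlt : (j : Int) < N - 1 := by push_cast at hj ⊢; omega
    have hj1 : j + 1 < arr.length := by
      have : (j : Int) + 1 < (arr.length : Int) := by omega
      exact_mod_cast this
    rw [totalCutsLoopA, if_pos hjlt]
    have hget : (PySem.List.pyGet? arr ((j : Int) + 1)).getD 0 = arr.getD (j + 1) 0 := by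
      have : ((j : Int) + 1) = ((j + 1 : Nat) : Int) := by push_cast; ring
      rw [this, PySem.List.pyGet?_natCast, List.getD_eq_getElem?_getD]
    cases f with
    | zero =>
      -- last iteration: the recursive call returns ans' regardless of sm'
      rw [specCnt, specCnt]
      simp only [hget, if_lt_eq_max]
      rfl
    | succ f' =>
      have hj2 : j + 2 < arr.length := by
        have : (j : Int) + 2 < (arr.length : Int) := by push_cast at hj; omega
        exact_mod_cast this
      have hguard : ((j : Int) + 1) + 1 ≤ N - 1 := by push_cast at hj; omega
      have hsm' :
          (if (PySem.List.pyGet? arr ((j:Int)+1)).getD 0 = sMin (arr.drop (j + 1)) ∧ ((j:Int)+1) + 1 ≤ N - 1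
           then (PySem.List.min? (PySem.List.slice arr (some (((j:Int)+1) + 1)) none) (fun y => y)).getD (sMin (arr.drop (j + 1)))
           else sMin (arr.drop (j + 1))) = sMin (arr.drop (j + 2)) := by
        have hsl : PySem.List.slice arr (some (((j:Int)+1) + 1)) none = arr.drop (j + 2) := by
          have : ((j : Int) + 1) + 1 = ((j + 2 : Nat) : Int) := by push_cast; ring
          rw [this, PySem.List.slice_from_natCast]
        rw [hsl, min?_eq_sMin (drop_ne_nil_of_lt hj2)]
        have hai : (PySem.List.pyGet? arr ((j:Int)+1)).getD 0 = arr[j + 1]'hj1 := by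
          rw [hget, List.getD_eq_getElem?_getD, List.getElem?_eq_getElem hj1]; rfl
        simp only [hguard, and_true, Option.getD_some]
        exact sm_step hj1 hj2 hai
      rw [hsm']
      have hcast : (j : Int) + 1 = ((j + 1 : Nat) : Int) := by push_cast; ring
      have harr2 : arr.drop (j + 2) = arr.drop ((j + 1) + 1) := by norm_num
      rw [hget, if_lt_eq_max, hcast, harr2,
        ih (j + 1) (max lg (arr.getD (j + 1) 0)) _ (by push_cast at hj ⊢; omega)]
      rfl

theorem sufMinsB_length (arr : List Int) : (sufMinsB arr).length = arr.length := by
  induction arr with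
  | nil => rfl
  | cons x rest ih =>
    rw [sufMinsB]
    cases h : sufMinsB rest with
    | nil => simp [h] at ih; simp [ih]
    | cons m t => simp [h] at ih; simp [ih]

theorem sufMinsB_getElem? (arr : List Int) : ∀ j : Nat, j < arr.length →
    (sufMinsB arr)[j]? = some (sMin (arr.drop j)) := by
  induction arr with
  | nil => intro j hj; simp at hj
  | cons x rest ih =>
    intro j hj
    cases hrest : sufMinsB rest with
    | nil =>
      have hr0 : rest = [] := by
        have := sufMinsB_length rest; rw [hrest] at this
        cases rest with
        | nil => rfl
        | cons a b => simp at this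
      subst hr0
      have hj0 : j = 0 := by simp at hj; omega
      subst hj0
      simp [sufMinsB, sMin]
    | cons m t =>
      have hrne : rest ≠ [] := by
        intro h; subst h; simp [sufMinsB] at hrest
      have hrlen : 0 < rest.length := List.length_pos_of_ne_nil hrne
      have hm : m = sMin rest := by
        have := ih 0 hrlen
        rw [hrest] at this; simpa using this
      rw [sufMinsB, hrest]
      cases j with
      | zero =>
        simp only [List.getElem?_cons_zero, List.drop_zero]
        rw [hm, if_lt_eq_min, sMin_cons hrne]
      | succ j' =>
        have hj' : j' < rest.length := by simpa using hj
        have := ih j' hj'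
        rw [hrest] at this
        simpa using this

theorem sufMinsB_get (arr : List Int) (j : Nat) (hj : j < arr.length) :
    (PySem.List.pyGet? (sufMinsB arr) ((j : Nat) : Int)).getD 0 = sMin (arr.drop j) := by
  rw [PySem.List.pyGet?_natCast, sufMinsB_getElem? arr j hj]; rfl

theorem foldB_eq_spec (k N : Int) (arr : List Int) (hN : N ≤ (arr.length : Int)) :
    ∀ (fuel j : Nat) (p ans : Int), (j : Int) + fuel = N - 1 → j < arr.length →
      ((PySem.List.pyRange (j : Int) (N - 1) 1).foldl
        (fun (st : Option Int × Int) (i : Int) =>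
          (some (match st.1 with
                 | none => (PySem.List.pyGet? arr i).getD 0
                 | some p => if (PySem.List.pyGet? arr i).getD 0 > p then (PySem.List.pyGet? arr i).getD 0 else p),
           if (match st.1 with
               | none => (PySem.List.pyGet? arr i).getD 0
               | some p => if (PySem.List.pyGet? arr i).getD 0 > p then (PySem.List.pyGet? arr i).getD 0 else p)
              + (PySem.List.pyGet? (sufMinsB arr) (i + 1)).getD 0 ≥ k then st.2 + 1 else st.2))
        (some p, ans)).2 = specCnt k arr fuel j (max p (arr.getD j 0)) ans := by
  intro fuel
  induction fuel with
  | zero =>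
    intro j p ans hj _
    have hnil : PySem.List.pyRange (j : Int) (N - 1) 1 = [] := by
      rw [PySem.List.pyRange_one]
      have h0 : (N - 1 - (j : Int)).toNat = 0 := by omega
      simp [h0]
    rw [hnil]; rfl
  | succ f ih =>
    intro j p ans hj hjlen
    have hjlt : (j : Int) < N - 1 := by push_cast at hj ⊢; omega
    have hj1 : j + 1 < arr.length := by
      have : (j : Int) + 1 < (arr.length : Int) := by omega
      exact_mod_cast this
    rw [PySem.List.pyRange_one_cons hjlt]
    simp only [List.foldl_cons]
    have hx : (PySem.List.pyGet? arr (j : Int)).getD 0 = arr.getD j 0 := by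
      rw [PySem.List.pyGet?_natCast, List.getD_eq_getElem?_getD]
    have hsuf : (PySem.List.pyGet? (sufMinsB arr) ((j : Int) + 1)).getD 0 = sMin (arr.drop (j + 1)) := by
      rw [show (j : Int) + 1 = ((j + 1 : Nat) : Int) by push_cast; ring, sufMinsB_get arr (j + 1) hj1]
    rw [hx, hsuf, if_gt_eq_max p (arr.getD j 0),
      show ((j : Int) + 1) = ((j + 1 : Nat) : Int) by push_cast; ring,
      ih (j + 1) (max p (arr.getD j 0))
        (if max p (arr.getD j 0) + sMin (arr.drop (j + 1)) ≥ k then ans + 1 else ans)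
        (by push_cast at hj ⊢; omega) hj1]
    rfl

-- ===== VERDICT (by name: the statement is the Claim_ definition above) =====
theorem totalCuts_spec : Claim_equal_totalCuts := by
  intro N k arr _ hpre
  unfold Spec_totalCuts
  rcases eq_or_ne N 1 with rfl | hN1
  · simp only [totalCuts, totalCuts_alt]
    norm_num [PySem.List.pyRange_one]
  rcases hpre with rfl | ⟨hlen, hNle⟩
  · exact absurd rfl hN1
  by_cases hN2 : N ≤ 1
  · -- N ≤ 0 (N ≠ 1): both loops run zero iterations
    rw [totalCuts, if_neg hN1, totalCuts_alt]
    have h1 : (N - 1).toNat = 0 := by omega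
    have h2 : PySem.List.pyRange 0 (N - 1) 1 = [] := by
      rw [PySem.List.pyRange_one]
      simp only [List.map_eq_nil_iff, List.range_eq_nil]
      omega
    rw [h1, h2]; rfl
  · -- 2 ≤ N ≤ len: both sides equal specCnt
    push_neg at hN2
    have h0len : 0 < arr.length := by omega
    have h1len : 1 < arr.length := by omega
    obtain ⟨f, hf⟩ : ∃ f : Nat, (N - 1).toNat = f + 1 := ⟨(N - 2).toNat, by omega⟩
    -- A side
    rw [totalCuts, if_neg hN1]
    have hlg0 : (PySem.List.pyGet? arr 0).getD 0 = arr.getD 0 0 := by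
      rw [show (0 : Int) = ((0 : Nat) : Int) by norm_num, PySem.List.pyGet?_natCast,
        List.getD_eq_getElem?_getD]
    have hsm0 : (PySem.List.min? (PySem.List.slice arr (some 1) none) (fun y => y)).getD 0
        = sMin (arr.drop 1) := by
      rw [show (1 : Int) = ((1 : Nat) : Int) by norm_num, PySem.List.slice_from_natCast,
        min?_eq_sMin (drop_ne_nil_of_lt h1len)]
      rfl
    have hA := loopA_eq_spec k N arr hNle ((N - 1).toNat) 0 (arr.getD 0 0) 0
      (by push_cast; omega)
    simp only [Nat.cast_zero, zero_add] at hA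
    rw [show arr.drop (0 + 1) = arr.drop 1 by norm_num] at hA
    rw [hlg0, hsm0, hA]
    -- B side
    rw [totalCuts_alt]
    rw [PySem.List.pyRange_one_cons (show (0 : Int) < N - 1 by omega)]
    simp only [List.foldl_cons]
    have hsuf1 : (PySem.List.pyGet? (sufMinsB arr) ((0 : Int) + 1)).getD 0 = sMin (arr.drop 1) := by
      rw [show (0 : Int) + 1 = ((1 : Nat) : Int) by norm_num, sufMinsB_get arr 1 h1len]
    rw [hlg0, hsuf1, show (0 : Int) + 1 = ((1 : Nat) : Int) by norm_num]
    have hB := foldB_eq_spec k N arr hNle f 1 (arr.getD 0 0)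
      (if arr.getD 0 0 + sMin (arr.drop 1) ≥ k then ((1 : Nat) : Int) else 0)
      (by push_cast; omega) h1len
    rw [hB]
    rw [hf, specCnt]
    norm_num
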